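-- pv_equiv track=rewrite | github.com/need-singularity/sylvian-singularity | .shared/calc/topos_divisor_analysis.py | upward_closed_subsets
-- ===== SOURCE A (Python) =====
-- import itertools
--
-- def upward_closed_subsets(objs):
--     """Upward-closed subsets (filters / sieves on initial object).
--     If a ∈ S and a|b then b ∈ S.
--     """
--     uc_sets = []
--     for r in range(len(objs) + 1):
--         for subset in itertools.combinations(objs, r):
--             s = set(subset)
--             is_uc = True
--             for a in s:
--                 for b in objs:
--                     if b % a == 0 and b not in s:
--                         is_uc = False
--                         break
--                 if not is_uc:
--                     break
--             if is_uc: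
--                 uc_sets.append(s)
--     return uc_sets
-- ===== SOURCE B (Python) =====
-- def upward_closed_subsets(objs):
--     """Upward-closed subsets (filters / sieves on initial object).
--     If a ∈ S and a|b then b ∈ S.
--     """
--     # once per distinct value: the set of its multiples occurring in objs
--     up = {}
--     for v in objs:
--         if v not in up:
--             up[v] = {b for b in objs if b % v == 0}
--     # Pascal-style table over the suffix objs[k:]:
--     # table[r] holds (s, need) for every size-r combination of the suffix that
--     # can still become upward-closed, in itertools.combinations order, where
--     # s = set(combination) and need = required multiples not yet in s.
--     # A branch is pruned as soon as some needed value cannot occur any more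
--     # (need is no subset of the unprocessed prefix).
--     table = [[(set(), set())]]
--     for k in reversed(range(len(objs))):
--         x = objs[k]
--         pre = set(objs[:k])
--         new = []
--         for r in range(len(table) + 1):
--             row = []
--             if r >= 1:
--                 for s, need in table[r - 1]:
--                     s2 = {x} | s
--                     need2 = (need | up[x]) - s2
--                     if need2 <= pre:
--                         row.append((s2, need2))
--             if r < len(table):
--                 row.extend(p for p in table[r] if p[1] <= pre)
--             new.append(row)
--         table = new
--     out = []
--     for row in table:
--         for s, _ in row:
--             out.append(s)
--     return out
-- ===== Notes on version B (the rewrite author's own statement) =====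
-- stated objective: alternative
-- what changed: Instead of generating all 2^n combinations with itertools and re-scanning objs twice per subset, B precomputes each value's multiples once and grows subsets by a Pascal-style DP over suffixes, carrying the set of still-missing multiples and pruning every branch whose missing values can no longer occur, so only potentially upward-closed subsets are ever materialised (intended as faster; a timing run measured 3.42x at the largest size both finished but could not confirm it overall).
import Mathlib
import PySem

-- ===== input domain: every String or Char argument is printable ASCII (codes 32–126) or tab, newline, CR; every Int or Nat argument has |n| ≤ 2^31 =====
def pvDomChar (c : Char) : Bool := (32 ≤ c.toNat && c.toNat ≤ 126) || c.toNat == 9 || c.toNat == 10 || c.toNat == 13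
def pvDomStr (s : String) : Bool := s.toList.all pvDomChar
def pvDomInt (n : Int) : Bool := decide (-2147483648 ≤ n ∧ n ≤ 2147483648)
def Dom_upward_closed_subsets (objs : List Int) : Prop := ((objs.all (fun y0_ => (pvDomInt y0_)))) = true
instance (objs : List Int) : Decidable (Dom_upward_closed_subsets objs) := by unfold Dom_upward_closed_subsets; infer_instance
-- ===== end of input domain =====

-- B replaces A's full 2^n itertools enumeration with a precomputed multiples table and a
-- pruned Pascal-style DP that only keeps subsets which can still become upward-closed
-- (an alternative algorithm; not confirmed faster in a timing run); return values proved equal.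

-- ===== PORT A =====
-- itertools.combinations(objs, r) in itertools' order (r : Int since A's r comes from range())
def pvCombos (r : Int) : List Int → List (List Int)
  | [] => if r = 0 then [[]] else []
  | x :: xs => if r = 0 then [[]] else (pvCombos (r - 1) xs).map (fun t => x :: t) ++ pvCombos r xs

-- A's doubly-nested is_uc loop with breaks ≡ all/all (a Bool, independent of set-iteration order)
def pvIsUC (s : PySem.Set Int) (objs : List Int) : Bool :=
  s.all (fun a => objs.all (fun b => !(PySem.Int.mod b a == 0 && !(PySem.Set.contains s b))))

def upward_closed_subsets (objs : List Int) : List (List Int) :=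
  (PySem.List.pyRange 0 ((objs.length : Int) + 1) 1).foldl (fun uc_sets r =>
    (pvCombos r objs).foldl (fun uc_sets subset =>
      let s := PySem.Set.ofList subset
      if pvIsUC s objs then uc_sets ++ [(s : List Int)] else uc_sets) uc_sets) []

-- ===== PORT B =====
-- body of Source B's 'for v in objs' loop building up = {v: {b for b in objs if b % v == 0}}
def pvUpStep (objs : List Int) (d : PySem.Dict Int (PySem.Set Int)) (v : Int) :
    PySem.Dict Int (PySem.Set Int) :=
  if d.contains v then d
  else d.insert v (PySem.Set.ofList (objs.filter (fun b => PySem.Int.mod b v == 0)))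

def pvUp (objs : List Int) : PySem.Dict Int (PySem.Set Int) :=
  objs.foldl (pvUpStep objs) PySem.Dict.empty

-- one step of Source B's loop over k (x = objs[k], pre = set(objs[:k])); the two
-- append-into-row loops are the filterMap / filter below
def pvStep (up : PySem.Dict Int (PySem.Set Int)) (x : Int) (pre : PySem.Set Int)
    (table : List (List (PySem.Set Int × PySem.Set Int))) :
    List (List (PySem.Set Int × PySem.Set Int)) :=
  (List.range (table.length + 1)).map (fun r =>
    (if 1 ≤ r then
      (table[r - 1]?.getD []).filterMap (fun p =>
        let s2 := PySem.Set.union (PySem.Set.ofList [x]) p.1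
        let need2 := PySem.Set.diff (PySem.Set.union p.2 (up.getD x PySem.Set.empty)) s2
        if PySem.Set.issubset need2 pre then some (s2, need2) else none)
    else []) ++
    (if r < table.length then
      (table[r]?.getD []).filter (fun p => PySem.Set.issubset p.2 pre)
    else []))

-- Source B's 'for k in reversed(range(len(objs)))' loop, with objs split as pre ++ suffix so that
-- pre is exactly objs[:k] when x = objs[k]; called as pvBuild objs [] objs
def pvBuild (objs : List Int) : List Int → List Int → List (List (PySem.Set Int × PySem.Set Int))
  | _pre, [] => [[(PySem.Set.empty, PySem.Set.empty)]]
  | pre, x :: ys => pvStep (pvUp objs) x (PySem.Set.ofList pre) (pvBuild objs (pre ++ [x]) ys)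

def upward_closed_subsets_alt (objs : List Int) : List (List Int) :=
  (pvBuild objs [] objs).foldl (fun out row =>
    row.foldl (fun out p => out ++ [(p.1 : List Int)]) out) []

-- ===== PRECONDITION & SPEC =====
-- Pre_ excludes exactly the inputs containing 0: there Python A raises ZeroDivisionError (b % 0).
def Pre_upward_closed_subsets (objs : List Int) : Prop := (0 : Int) ∉ objs
instance (objs : List Int) : Decidable (Pre_upward_closed_subsets objs) := by unfold Pre_upward_closed_subsets; infer_instance
def pvWitness_upward_closed_subsets : List Int := [2, 4, 3]

def Spec_upward_closed_subsets (objs : List Int) (out : List (List Int)) : Prop := out = upward_closed_subsets_alt objs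
instance (objs : List Int) (out : List (List Int)) : Decidable (Spec_upward_closed_subsets objs out) := by unfold Spec_upward_closed_subsets; infer_instance

-- ===== CLAIM (what is proved, stated in full; the proofs are below) =====
def Claim_equal_upward_closed_subsets : Prop := ∀ (objs : List Int), Dom_upward_closed_subsets objs → Pre_upward_closed_subsets objs → Spec_upward_closed_subsets objs (upward_closed_subsets objs)

-- ===== LEMMAS AND PROOFS =====

-- the multiples of a occurring in objs, as Source B's up[a]
def pvUpv (objs : List Int) (a : Int) : PySem.Set Int :=
  PySem.Set.ofList (objs.filter (fun b => PySem.Int.mod b a == 0))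

-- spec of the 'need' component carried by B for the subset with element list c
def pvNOf (objs : List Int) : List Int → PySem.Set Int
  | [] => PySem.Set.empty
  | x :: c => PySem.Set.diff (PySem.Set.union (pvNOf objs c) (pvUpv objs x))
      (PySem.Set.union (PySem.Set.ofList [x]) (PySem.Set.ofList c))

-- the filterMap body characterising a surviving table entry
def pvCond (objs : List Int) (pre : List Int) (c : List Int) : Option (PySem.Set Int × PySem.Set Int) :=
  if PySem.Set.issubset (pvNOf objs c) (PySem.Set.ofList pre) = true
  then some (PySem.Set.ofList c, pvNOf objs c) else none

lemma pvCombos_zero (l : List Int) : pvCombos 0 l = [[]] := by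
  cases l <;> simp [pvCombos]

lemma pvCombos_neg (r : Int) (hr : r < 0) : ∀ l : List Int, pvCombos r l = [] := by
  intro l
  induction l generalizing r with
  | nil => simp [pvCombos]; omega
  | cons x xs ih =>
    simp only [pvCombos]
    rw [if_neg (by omega)]
    simp [ih (r-1) (by omega), ih r hr]

lemma pvCombos_cons (r : Int) (x : Int) (xs : List Int) :
    pvCombos r (x :: xs) = (pvCombos (r - 1) xs).map (fun t => x :: t) ++ pvCombos r xs := by
  by_cases h : r = 0
  · subst h
    simp [pvCombos, pvCombos_neg (-1) (by omega), pvCombos_zero]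
  · simp [pvCombos, h]

lemma pvCombos_len_lt : ∀ (l : List Int) (r : Int), (l.length : Int) < r → pvCombos r l = [] := by
  intro l
  induction l with
  | nil => intro r hr; simp at hr; simp [pvCombos]; omega
  | cons x xs ih =>
    intro r hr
    simp at hr
    simp only [pvCombos]
    rw [if_neg (by omega)]
    simp [ih (r-1) (by omega), ih r (by omega)]

lemma pvUpdate_ofList (s : PySem.Set Int) (c : List Int) :
    PySem.Set.update s (PySem.Set.ofList c) = PySem.Set.update s c := by
  induction c using List.reverseRecOn with
  | nil => rfl
  | append_singleton c y ih =>
    rw [PySem.Set.ofList_append_singleton, PySem.Set.update_append]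
    by_cases hy : y ∈ c
    · rw [PySem.Set.add_of_mem ((PySem.Set.mem_ofList _ _).2 hy), ih]
      have : PySem.Set.update (PySem.Set.update s c) [y] = PySem.Set.update s c := by
        show PySem.Set.add (PySem.Set.update s c) y = _
        exact PySem.Set.add_of_mem (((PySem.Set.mem_update _ _ _).2 (Or.inr hy)))
      rw [this]
    · rw [PySem.Set.add_of_not_mem (fun h => hy ((PySem.Set.mem_ofList _ _).1 h)), PySem.Set.update_append, ih]

lemma pvSOf_cons (x : Int) (c : List Int) :
    PySem.Set.ofList (x :: c) = PySem.Set.union (PySem.Set.ofList [x]) (PySem.Set.ofList c) := by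
  show PySem.Set.update PySem.Set.empty (x :: c) = PySem.Set.union (PySem.Set.ofList [x]) (PySem.Set.ofList c)
  rw [PySem.Set.update_cons]
  show PySem.Set.update (PySem.Set.ofList [x]) c = _
  rw [PySem.Set.union, pvUpdate_ofList]

lemma issubset_mono (s : PySem.Set Int) (pre : List Int) (x : Int)
    (h : PySem.Set.issubset s (PySem.Set.ofList pre) = true) :
    PySem.Set.issubset s (PySem.Set.ofList (pre ++ [x])) = true := by
  rw [PySem.Set.issubset_iff] at h ⊢
  intro y hy
  have := h y hy
  rw [PySem.Set.mem_ofList] at this ⊢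
  simp [this]

lemma mem_pvNOf (objs : List Int) (c : List Int) (y : Int) :
    y ∈ pvNOf objs c ↔ ((∃ a ∈ c, y ∈ objs ∧ PySem.Int.mod y a = 0) ∧ y ∉ c) := by
  induction c with
  | nil => simp [pvNOf, PySem.Set.empty]
  | cons x c ih =>
    simp only [pvNOf]
    rw [← pvSOf_cons x c]
    rw [PySem.Set.mem_diff]
    rw [PySem.Set.mem_union]
    rw [PySem.Set.mem_ofList]
    rw [ih]
    simp only [pvUpv, PySem.Set.mem_ofList, List.mem_filter, List.mem_cons, beq_iff_eq]
    constructor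
    · rintro ⟨h1 | h2, hnotin⟩
      · exact ⟨⟨h1.1.choose, Or.inr h1.1.choose_spec.1, h1.1.choose_spec.2⟩, hnotin⟩
      · exact ⟨⟨x, Or.inl rfl, h2.1, h2.2⟩, hnotin⟩
    · rintro ⟨⟨a, (rfl | ha), hy⟩, hnotin⟩
      · exact ⟨Or.inr hy, hnotin⟩
      · exact ⟨Or.inl ⟨⟨a, ha, hy⟩, fun hc => hnotin (Or.inr hc)⟩, hnotin⟩

lemma pvIsUC_eq (objs c : List Int) :
    pvIsUC (PySem.Set.ofList c) objs = PySem.Set.issubset (pvNOf objs c) (PySem.Set.ofList []) := by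
  apply Bool.eq_iff_iff.mpr
  rw [PySem.Set.issubset_iff]
  simp only [pvIsUC, List.all_eq_true, Bool.not_eq_eq_eq_not, Bool.not_true, Bool.and_eq_false_imp,
    PySem.Set.mem_ofList]
  simp only [beq_iff_eq, Bool.not_false, PySem.Set.contains_iff, PySem.Set.mem_ofList, List.mem_nil_iff]
  constructor
  · intro h y hy
    rw [mem_pvNOf] at hy
    obtain ⟨⟨a, ha, hyo, hmod⟩, hnot⟩ := hy
    exact hnot (h a ha y hyo hmod)
  · intro h a ha b hb hmod
    by_contra hbc
    exact h b ((mem_pvNOf objs c b).2 ⟨⟨a, ha, hb, hmod⟩, hbc⟩)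

lemma pvUp_contains_mono (objs : List Int) :
    ∀ (l : List Int) (d : PySem.Dict Int (PySem.Set Int)) (w : Int), d.contains w = true →
    (l.foldl (pvUpStep objs) d).contains w = true := by
  intro l
  induction l with
  | nil => intro d w h; exact h
  | cons v l ih =>
    intro d w h
    simp only [List.foldl_cons]
    apply ih
    unfold pvUpStep
    by_cases hc : d.contains v
    · simpa [hc]
    · rw [if_neg hc, PySem.Dict.contains_insert]
      simp [h]

lemma pvUp_fold_getD (objs : List Int) :
    ∀ (l : List Int) (d : PySem.Dict Int (PySem.Set Int)),
    (∀ w, d.contains w = true → d.getD w PySem.Set.empty = pvUpv objs w) →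
    (∀ w, (l.foldl (pvUpStep objs) d).contains w = true →
      (l.foldl (pvUpStep objs) d).getD w PySem.Set.empty = pvUpv objs w) := by
  intro l
  induction l with
  | nil => intro d hd; exact hd
  | cons v l ih =>
    intro d hd
    simp only [List.foldl_cons]
    apply ih
    intro w hw
    unfold pvUpStep at hw ⊢
    by_cases hc : d.contains v
    · rw [if_pos hc] at hw ⊢
      exact hd w hw
    · rw [if_neg hc] at hw ⊢
      rw [PySem.Dict.getD_insert]
      by_cases hwv : w = v
      · simp [hwv, pvUpv]
      · rw [if_neg hwv]
        apply hd
        rw [PySem.Dict.contains_insert] at hw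
        simpa [hwv] using hw

lemma pvUp_fold_contains (objs : List Int) :
    ∀ (l : List Int) (d : PySem.Dict Int (PySem.Set Int)) (v : Int), v ∈ l →
    (l.foldl (pvUpStep objs) d).contains v = true := by
  intro l
  induction l with
  | nil => intro d v hv; simp at hv
  | cons x l ih =>
    intro d v hv
    simp only [List.foldl_cons]
    rcases List.mem_cons.1 hv with rfl | hv'
    · apply pvUp_contains_mono
      unfold pvUpStep
      by_cases hc : d.contains v
      · simp [hc]
      · rw [if_neg hc]
        exact PySem.Dict.contains_insert_self _ _ _
    · exact ih _ v hv'

lemma pvUp_getD (objs : List Int) (v : Int) (hv : v ∈ objs) :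
    (pvUp objs).getD v PySem.Set.empty = pvUpv objs v :=
  pvUp_fold_getD objs objs PySem.Dict.empty
    (fun w hw => by simp [PySem.Dict.contains_empty] at hw) v
    (pvUp_fold_contains objs objs PySem.Dict.empty v hv)

lemma pvNOf_cons_sub (objs : List Int) (pre : List Int) (x : Int) (c : List Int)
    (h : PySem.Set.issubset (pvNOf objs (x :: c)) (PySem.Set.ofList pre) = true) :
    PySem.Set.issubset (pvNOf objs c) (PySem.Set.ofList (pre ++ [x])) = true := by
  rw [PySem.Set.issubset_iff] at h ⊢
  intro y hy
  rw [mem_pvNOf] at hy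
  obtain ⟨⟨a, ha, hyo, hmod⟩, hnot⟩ := hy
  rw [PySem.Set.mem_ofList]
  by_cases hyx : y = x
  · simp [hyx]
  · have : y ∈ pvNOf objs (x :: c) := by
      rw [mem_pvNOf]
      exact ⟨⟨a, List.mem_cons_of_mem _ ha, hyo, hmod⟩, by
        intro hmem
        rcases List.mem_cons.1 hmem with h' | h'
        · exact hyx h'
        · exact hnot h'⟩
    have := h y this
    rw [PySem.Set.mem_ofList] at this
    simp [this]

lemma pvFilterMap_if (q : List Int → Bool) (F : List Int → PySem.Set Int × PySem.Set Int) (l : List (List Int)) :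
    l.filterMap (fun c => if q c then some (F c) else none) = (l.filter q).map F := by
  induction l with
  | nil => rfl
  | cons x l ih => by_cases h : q x <;> simp [h, ih]
lemma pvBuild_eq (objs : List Int) :
    ∀ (ys pre : List Int), (∀ v ∈ ys, v ∈ objs) →
    pvBuild objs pre ys = (List.range (ys.length + 1)).map (fun (r : Nat) =>
      (pvCombos (r : Int) ys).filterMap (pvCond objs pre)) := by
  intro ys
  induction ys with
  | nil =>
    intro pre _
    show [[(PySem.Set.empty, PySem.Set.empty)]] = _
    simp [pvCombos, pvCond, pvNOf]
  | cons x ys ih =>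
    intro pre hsub
    have hx : x ∈ objs := hsub x (List.mem_cons_self)
    have hys : ∀ v ∈ ys, v ∈ objs := fun v hv => hsub v (List.mem_cons_of_mem _ hv)
    show pvStep (pvUp objs) x (PySem.Set.ofList pre) (pvBuild objs (pre ++ [x]) ys) = _
    rw [ih (pre ++ [x]) hys]
    unfold pvStep
    rw [List.length_map, List.length_range]
    apply List.map_congr_left
    intro r hr
    rw [List.mem_range] at hr
    -- split the combinations of x :: ys
    rw [pvCombos_cons, List.filterMap_append, List.filterMap_map]
    congr 1
    -- take branch = combinations containing x
    · by_cases h1 : 1 ≤ r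
      · rw [if_pos h1]
        rw [List.getElem?_map, List.getElem?_range (by omega : r - 1 < ys.length + 1)]
        simp only [Option.map_some, Option.getD_some]
        rw [List.filterMap_filterMap]
        have hcast : ((r - 1 : Nat) : Int) = (r : Int) - 1 := by omega
        rw [hcast]
        apply List.filterMap_congr
        intro c _
        simp only [pvCond, Function.comp]
        by_cases h2 : PySem.Set.issubset (pvNOf objs c) (PySem.Set.ofList (pre ++ [x])) = true
        · rw [if_pos h2]
          simp only [Option.bind_some]
          rw [pvUp_getD objs x hx]
          rw [← pvSOf_cons x c]
          show (if PySem.Set.issubset (PySem.Set.diff (PySem.Set.union (pvNOf objs c) (pvUpv objs x)) (PySem.Set.ofList (x :: c))) (PySem.Set.ofList pre) = true then _ else _) = _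
          rw [show PySem.Set.diff (PySem.Set.union (pvNOf objs c) (pvUpv objs x)) (PySem.Set.ofList (x :: c)) = pvNOf objs (x :: c) from by rw [pvNOf, ← pvSOf_cons x c]]
        · rw [if_neg h2]
          simp only [Option.bind_none]
          rw [if_neg (fun hcon => h2 (pvNOf_cons_sub objs pre x c hcon))]
      · have hr0 : r = 0 := by omega
        subst hr0
        rw [if_neg h1]
        rw [show ((0 : Nat) : Int) - 1 = -1 from by norm_num, pvCombos_neg (-1) (by norm_num)]
        simp
    -- keep branch = combinations avoiding x
    · by_cases h2 : r < ys.length + 1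
      · rw [if_pos h2]
        rw [List.getElem?_map, List.getElem?_range h2]
        simp only [Option.map_some, Option.getD_some]
        rw [List.filter_filterMap]
        apply List.filterMap_congr
        intro c _
        simp only [pvCond]
        by_cases h3 : PySem.Set.issubset (pvNOf objs c) (PySem.Set.ofList (pre ++ [x])) = true
        · rw [if_pos h3]
          by_cases h4 : PySem.Set.issubset (pvNOf objs c) (PySem.Set.ofList pre) = true
          · rw [if_pos h4]
            simp [Option.filter, h4]
          · rw [if_neg h4]
            simp [Option.filter, h4]
        · rw [if_neg h3]
          rw [if_neg (fun h4 => h3 (issubset_mono _ pre x h4))]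
          simp
      · rw [if_neg h2]
        rw [pvCombos_len_lt ys r (by exact_mod_cast by omega : (ys.length : Int) < (r : Int))]
        simp

lemma pyRange_len (n : Nat) :
    PySem.List.pyRange 0 ((n : Int) + 1) 1 = (List.range (n + 1)).map (fun (k : Nat) => (k : Int)) := by
  rw [PySem.List.pyRange_one]
  have : (((n : Int) + 1) - 0).toNat = n + 1 := by omega
  rw [this]
  apply List.map_congr_left
  intro k _
  omega

theorem upward_closed_subsets_spec : Claim_equal_upward_closed_subsets := by
  intro objs _ _
  show upward_closed_subsets objs = upward_closed_subsets_alt objs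
  unfold upward_closed_subsets upward_closed_subsets_alt
  rw [pvBuild_eq objs objs [] (fun v hv => hv)]
  rw [pyRange_len, List.foldl_map]
  have hbodyA : ∀ (acc : List (List Int)) (k : Nat),
      (pvCombos ((k : Nat) : Int) objs).foldl (fun uc_sets subset =>
        let s := PySem.Set.ofList subset
        if pvIsUC s objs then uc_sets ++ [(s : List Int)] else uc_sets) acc
      = acc ++ (((pvCombos ((k : Nat) : Int) objs).filter
          (fun c => pvIsUC (PySem.Set.ofList c) objs)).map (fun c => (PySem.Set.ofList c : List Int))) := by
    intro acc k
    exact PySem.List.foldl_append_if _ _ _ acc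
  have hbodyB : ∀ (acc : List (List Int)) (row : List (PySem.Set Int × PySem.Set Int)),
      row.foldl (fun out p => out ++ [(p.1 : List Int)]) acc = acc ++ row.map (fun p => (p.1 : List Int)) := by
    intro acc row
    exact PySem.List.foldl_append_singleton_eq_map _ _ acc
  calc (List.range (objs.length + 1)).foldl (fun uc_sets k =>
        (pvCombos ((k : Nat) : Int) objs).foldl (fun uc_sets subset =>
          let s := PySem.Set.ofList subset
          if pvIsUC s objs then uc_sets ++ [(s : List Int)] else uc_sets) uc_sets) []
      = (List.range (objs.length + 1)).foldl (fun acc k => acc ++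
          (((pvCombos ((k : Nat) : Int) objs).filter (fun c => pvIsUC (PySem.Set.ofList c) objs)).map
            (fun c => (PySem.Set.ofList c : List Int)))) [] := by
        apply PySem.List.foldl_congr_mem
        intro acc k _
        exact hbodyA acc k
    _ = ((List.range (objs.length + 1)).map (fun (r : Nat) =>
          (pvCombos (r : Int) objs).filterMap (pvCond objs []))).foldl
          (fun out row => row.foldl (fun out p => out ++ [(p.1 : List Int)]) out) [] := by
        rw [List.foldl_map]
        apply PySem.List.foldl_congr_mem
        intro acc k _
        rw [hbodyB acc _]
        congr 1
        unfold pvCond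
        rw [pvFilterMap_if (fun c => PySem.Set.issubset (pvNOf objs c) (PySem.Set.ofList []))
          (fun c => (PySem.Set.ofList c, pvNOf objs c))]
        rw [List.map_map]
        congr 1
        apply List.filter_congr
        intro c _
        rw [pvIsUC_eq]
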